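-- pv_equiv track=rewrite | github.com/othyagen/scribe-local | app/case_compare.py | _compare_prioritization
-- ===== SOURCE A (Python) =====
-- def _compare_prioritization(text_eo: dict, tts_eo: dict) -> dict:
--     text_prio = {
--         h["title"]: h.get("priority_class", "")
--         for h in text_eo.get("hypotheses", []) if h.get("title")
--     }
--     tts_prio = {
--         h["title"]: h.get("priority_class", "")
--         for h in tts_eo.get("hypotheses", []) if h.get("title")
--     }
--
--     all_titles = set(text_prio.keys()) | set(tts_prio.keys())
--
--     unchanged = []
--     changed = []
--     dropped = []
--     added = []
--
--     for title in sorted(all_titles):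
--         in_text = title in text_prio
--         in_tts = title in tts_prio
--         if in_text and in_tts:
--             if text_prio[title] == tts_prio[title]:
--                 unchanged.append({"title": title, "priority_class": text_prio[title]})
--             else:
--                 changed.append({
--                     "title": title,
--                     "text_priority": text_prio[title],
--                     "tts_priority": tts_prio[title],
--                 })
--         elif in_text:
--             dropped.append({"title": title, "priority_class": text_prio[title]})
--         else:
--             added.append({"title": title, "priority_class": tts_prio[title]})
--
--     return {
--         "unchanged": unchanged,
--         "changed": changed,
--         "dropped": dropped,
--         "added": added,
--     }
-- ===== SOURCE B (Python) =====
-- def _compare_prioritization(text_eo: dict, tts_eo: dict) -> dict: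
--     text_prio = {
--         h["title"]: h.get("priority_class", "")
--         for h in text_eo.get("hypotheses", []) if h.get("title")
--     }
--     tts_prio = {
--         h["title"]: h.get("priority_class", "")
--         for h in tts_eo.get("hypotheses", []) if h.get("title")
--     }
--
--     common = text_prio.keys() & tts_prio.keys()
--     dropped_keys = text_prio.keys() - tts_prio.keys()
--     added_keys = tts_prio.keys() - text_prio.keys()
--     common_sorted = sorted(common)
--
--     return {
--         "unchanged": [
--             {"title": t, "priority_class": text_prio[t]}
--             for t in common_sorted if text_prio[t] == tts_prio[t]
--         ],
--         "changed": [
--             {"title": t, "text_priority": text_prio[t], "tts_priority": tts_prio[t]}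
--             for t in common_sorted if text_prio[t] != tts_prio[t]
--         ],
--         "dropped": [
--             {"title": t, "priority_class": text_prio[t]}
--             for t in sorted(dropped_keys)
--         ],
--         "added": [
--             {"title": t, "priority_class": tts_prio[t]}
--             for t in sorted(added_keys)
--         ],
--     }
-- ===== Notes on version B (the rewrite author's own statement) =====
-- stated objective: simpler
-- what changed: Replaces A's single sorted pass over the key union with branch dispatch into four accumulators by set operations on the two key views (intersection and both differences) and four declarative list comprehensions, one per result bucket.
import Mathlib
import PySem

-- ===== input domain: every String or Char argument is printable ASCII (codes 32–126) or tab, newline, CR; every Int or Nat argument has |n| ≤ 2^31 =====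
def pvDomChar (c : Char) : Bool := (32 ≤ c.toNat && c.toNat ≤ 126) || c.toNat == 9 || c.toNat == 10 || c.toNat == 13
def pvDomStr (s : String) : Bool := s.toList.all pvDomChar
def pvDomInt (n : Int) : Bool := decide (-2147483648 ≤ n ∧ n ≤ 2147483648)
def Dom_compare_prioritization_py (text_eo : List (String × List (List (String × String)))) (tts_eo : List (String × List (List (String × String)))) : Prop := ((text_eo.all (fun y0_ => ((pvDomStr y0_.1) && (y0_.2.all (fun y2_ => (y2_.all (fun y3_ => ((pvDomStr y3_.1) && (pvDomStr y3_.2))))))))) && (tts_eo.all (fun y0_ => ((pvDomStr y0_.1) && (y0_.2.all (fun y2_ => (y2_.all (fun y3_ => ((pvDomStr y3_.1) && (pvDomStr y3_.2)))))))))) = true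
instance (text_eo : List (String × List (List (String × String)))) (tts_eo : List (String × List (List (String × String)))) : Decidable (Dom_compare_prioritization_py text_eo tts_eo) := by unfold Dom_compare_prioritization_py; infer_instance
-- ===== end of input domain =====

-- B replaces A's single sorted pass with branch dispatch by set operations on the key views
-- and four per-bucket comprehensions; objective: simpler (same result, proved equal on Dom).

-- ===== PORT A =====
-- shared prologue of both Pythons: eo.get("hypotheses", []), h.get(k, "") (first-match
-- association-list lookup), and the dict comprehension {h["title"]: h.get("priority_class","")}
def pvHyps (eo : List (String × List (List (String × String)))) : List (List (String × String)) :=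
  ((eo.find? (fun p => p.1 == "hypotheses")).map (·.2)).getD []

def pvGetStr (h : List (String × String)) (k : String) : String :=
  ((h.find? (fun p => p.1 == k)).map (·.2)).getD ""

def pvPrioDict (hyps : List (List (String × String))) : PySem.Dict String String :=
  (hyps.filter (fun h => pvGetStr h "title" != "")).foldl
    (fun d h => d.insert (pvGetStr h "title") (pvGetStr h "priority_class")) PySem.Dict.empty

def pvMkPC (t v : String) : List (String × String) := [("title", t), ("priority_class", v)]
def pvMkChanged (t v w : String) : List (String × String) :=
  [("title", t), ("text_priority", v), ("tts_priority", w)]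

-- the body of A's loop over sorted(all_titles): dispatch one title into the four accumulators
def pvStep (tp ttp : PySem.Dict String String)
    (acc : List (List (String × String)) × List (List (String × String)) ×
           List (List (String × String)) × List (List (String × String)))
    (title : String) :
    List (List (String × String)) × List (List (String × String)) ×
    List (List (String × String)) × List (List (String × String)) :=
  let (u, c, d, a) := acc
  let in_text := tp.contains title
  let in_tts := ttp.contains title
  if in_text && in_tts then
    if tp.getD title "" == ttp.getD title "" then
      (u ++ [pvMkPC title (tp.getD title "")], c, d, a)
    else
      (u, c ++ [pvMkChanged title (tp.getD title "") (ttp.getD title "")], d, a)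
  else if in_text then
    (u, c, d ++ [pvMkPC title (tp.getD title "")], a)
  else
    (u, c, d, a ++ [pvMkPC title (ttp.getD title "")])

-- A's single loop over sorted(all_titles)
def pvALoop (tp ttp : PySem.Dict String String) (titles : List String) :
    List (List (String × String)) × List (List (String × String)) ×
    List (List (String × String)) × List (List (String × String)) :=
  titles.foldl (pvStep tp ttp) ([], [], [], [])

def compare_prioritization_py (text_eo : List (String × List (List (String × String)))) (tts_eo : List (String × List (List (String × String)))) : List (String × List (List (String × String))) :=
  let tp := pvPrioDict (pvHyps text_eo)
  let ttp := pvPrioDict (pvHyps tts_eo)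
  let all_titles := PySem.Set.union (PySem.Set.ofList tp.keys) (PySem.Set.ofList ttp.keys)
  let r := pvALoop tp ttp (PySem.List.sorted all_titles (fun x => x))
  [("unchanged", r.1), ("changed", r.2.1), ("dropped", r.2.2.1), ("added", r.2.2.2)]

-- ===== PORT B =====
def compare_prioritization_py_alt (text_eo : List (String × List (List (String × String)))) (tts_eo : List (String × List (List (String × String)))) : List (String × List (List (String × String))) :=
  let tp := pvPrioDict (pvHyps text_eo)
  let ttp := pvPrioDict (pvHyps tts_eo)
  let common := PySem.Set.inter (PySem.Set.ofList tp.keys) (PySem.Set.ofList ttp.keys)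
  let dropped_keys := PySem.Set.diff (PySem.Set.ofList tp.keys) (PySem.Set.ofList ttp.keys)
  let added_keys := PySem.Set.diff (PySem.Set.ofList ttp.keys) (PySem.Set.ofList tp.keys)
  let common_sorted := PySem.List.sorted common (fun x => x)
  [("unchanged",
      (common_sorted.filter (fun t => tp.getD t "" == ttp.getD t "")).map
        (fun t => pvMkPC t (tp.getD t ""))),
   ("changed",
      (common_sorted.filter (fun t => tp.getD t "" != ttp.getD t "")).map
        (fun t => pvMkChanged t (tp.getD t "") (ttp.getD t ""))),
   ("dropped",
      (PySem.List.sorted dropped_keys (fun x => x)).map (fun t => pvMkPC t (tp.getD t ""))),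
   ("added",
      (PySem.List.sorted added_keys (fun x => x)).map (fun t => pvMkPC t (ttp.getD t "")))]

-- ===== PRECONDITION & SPEC =====
def Spec_compare_prioritization_py (text_eo : List (String × List (List (String × String)))) (tts_eo : List (String × List (List (String × String)))) (out : List (String × List (List (String × String)))) : Prop := out = compare_prioritization_py_alt text_eo tts_eo
instance (text_eo : List (String × List (List (String × String)))) (tts_eo : List (String × List (List (String × String)))) (out : List (String × List (List (String × String)))) : Decidable (Spec_compare_prioritization_py text_eo tts_eo out) := by unfold Spec_compare_prioritization_py; infer_instance

-- ===== CLAIM (what is proved, stated in full; the proofs are below) =====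
def Claim_equal_compare_prioritization_py : Prop := ∀ (text_eo : List (String × List (List (String × String)))) (tts_eo : List (String × List (List (String × String)))), Dom_compare_prioritization_py text_eo tts_eo → Spec_compare_prioritization_py text_eo tts_eo (compare_prioritization_py text_eo tts_eo)

-- ===== LEMMAS AND PROOFS =====

-- the sorted union filtered by a key predicate is the sorted list of the matching key set
theorem pv_sorted_filter (s : PySem.Set String) (hnd : s.Nodup) (p : String → Bool)
    (t : List String) (hperm : t.Perm ((s : List String).filter p)) :
    (PySem.List.sorted s (fun x => x)).filter p = PySem.List.sorted t (fun x => x) := by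
  have hp : (PySem.List.sorted s (fun x => x)).Pairwise (· < ·) :=
    ((PySem.List.sorted_pairwise s (fun x => x)).and
      (((PySem.List.sorted_perm s (fun x => x) false).nodup_iff).mpr hnd)).imp
      (fun h => lt_of_le_of_ne h.1 h.2)
  have hperm2 : ((PySem.List.sorted s (fun x => x)).filter p).Perm t :=
    ((PySem.List.sorted_perm s (fun x => x) false).filter p).trans hperm.symm
  exact (PySem.List.sorted_eq_of_perm_of_pairwise_lt t _ (fun x => x) hperm2 (hp.filter p)).symm

theorem pvStep_uc {tp ttp : PySem.Dict String String} {x : String} (u c d a :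
      List (List (String × String)))
    (htx : tp.contains x = true) (htt : ttp.contains x = true) :
    pvStep tp ttp (u, c, d, a) x =
      (if tp.getD x "" == ttp.getD x "" then (u ++ [pvMkPC x (tp.getD x "")], c, d, a)
       else (u, c ++ [pvMkChanged x (tp.getD x "") (ttp.getD x "")], d, a)) := by
  simp [pvStep, htx, htt]

theorem pvStep_d {tp ttp : PySem.Dict String String} {x : String} (u c d a :
      List (List (String × String)))
    (htx : tp.contains x = true) (htt : ttp.contains x = false) :
    pvStep tp ttp (u, c, d, a) x = (u, c, d ++ [pvMkPC x (tp.getD x "")], a) := by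
  simp [pvStep, htx, htt]

theorem pvStep_a {tp ttp : PySem.Dict String String} {x : String} (u c d a :
      List (List (String × String)))
    (htx : tp.contains x = false) :
    pvStep tp ttp (u, c, d, a) x = (u, c, d, a ++ [pvMkPC x (ttp.getD x "")]) := by
  simp [pvStep, htx]

-- A's fold splits into one filtered/mapped pass per bucket
theorem pvALoop_aux (tp ttp : PySem.Dict String String) (titles : List String) :
    ∀ u c d a, titles.foldl (pvStep tp ttp) (u, c, d, a) =
      (u ++ (titles.filter (fun t => tp.contains t && ttp.contains t && (tp.getD t "" == ttp.getD t ""))).map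
          (fun t => pvMkPC t (tp.getD t "")),
       c ++ (titles.filter (fun t => tp.contains t && ttp.contains t && !(tp.getD t "" == ttp.getD t ""))).map
          (fun t => pvMkChanged t (tp.getD t "") (ttp.getD t "")),
       d ++ (titles.filter (fun t => tp.contains t && !ttp.contains t)).map
          (fun t => pvMkPC t (tp.getD t "")),
       a ++ (titles.filter (fun t => !tp.contains t)).map
          (fun t => pvMkPC t (ttp.getD t ""))) := by
  induction titles with
  | nil => intro u c d a; simp
  | cons x xs ih =>
    intro u c d a
    cases htx : tp.contains x with
    | false =>
      rw [List.foldl_cons, pvStep_a u c d a htx, ih]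
      simp [htx]
    | true =>
      cases htt : ttp.contains x with
      | false =>
        rw [List.foldl_cons, pvStep_d u c d a htx htt, ih]
        simp [htx, htt]
      | true =>
        cases heq : (tp.getD x "" == ttp.getD x "") with
        | false =>
          rw [List.foldl_cons, pvStep_uc u c d a htx htt, if_neg (by simp [heq]), ih]
          simp [htx, htt, heq]
        | true =>
          rw [List.foldl_cons, pvStep_uc u c d a htx htt, if_pos (by simp [heq]), ih]
          simp [htx, htt, heq]

theorem pvALoop_eq_filters (tp ttp : PySem.Dict String String) (titles : List String) :
    pvALoop tp ttp titles =
      ((titles.filter (fun t => tp.contains t && ttp.contains t && (tp.getD t "" == ttp.getD t ""))).map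
          (fun t => pvMkPC t (tp.getD t "")),
       (titles.filter (fun t => tp.contains t && ttp.contains t && !(tp.getD t "" == ttp.getD t ""))).map
          (fun t => pvMkChanged t (tp.getD t "") (ttp.getD t "")),
       (titles.filter (fun t => tp.contains t && !ttp.contains t)).map
          (fun t => pvMkPC t (tp.getD t "")),
       (titles.filter (fun t => !tp.contains t)).map
          (fun t => pvMkPC t (ttp.getD t ""))) := by
  simpa [pvALoop] using pvALoop_aux tp ttp titles [] [] [] []

-- sorted(common) is the key-intersection slice of sorted(all_titles)
theorem pv_sorted_inter (tp ttp : PySem.Dict String String) :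
    (PySem.List.sorted
        (PySem.Set.union (PySem.Set.ofList tp.keys) (PySem.Set.ofList ttp.keys)) (fun x => x)).filter
        (fun t => tp.contains t && ttp.contains t) =
      PySem.List.sorted
        (PySem.Set.inter (PySem.Set.ofList tp.keys) (PySem.Set.ofList ttp.keys)) (fun x => x) := by
  apply pv_sorted_filter _ (PySem.Set.nodup_union _ _ (PySem.Set.nodup_ofList _))
  rw [List.perm_ext_iff_of_nodup
    (PySem.Set.nodup_inter _ _ (PySem.Set.nodup_ofList _))
    ((PySem.Set.nodup_union _ _ (PySem.Set.nodup_ofList _)).filter _)]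
  intro x
  simp only [List.mem_filter, PySem.Set.mem_inter, PySem.Set.mem_union, PySem.Set.mem_ofList,
    Bool.and_eq_true, PySem.Dict.contains_iff_mem_keys]
  tauto

-- sorted(dropped_keys) is the text-only slice of sorted(all_titles)
theorem pv_sorted_diff (tp ttp : PySem.Dict String String) :
    (PySem.List.sorted
        (PySem.Set.union (PySem.Set.ofList tp.keys) (PySem.Set.ofList ttp.keys)) (fun x => x)).filter
        (fun t => tp.contains t && !ttp.contains t) =
      PySem.List.sorted
        (PySem.Set.diff (PySem.Set.ofList tp.keys) (PySem.Set.ofList ttp.keys)) (fun x => x) := by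
  apply pv_sorted_filter _ (PySem.Set.nodup_union _ _ (PySem.Set.nodup_ofList _))
  rw [List.perm_ext_iff_of_nodup
    (PySem.Set.nodup_diff _ _ (PySem.Set.nodup_ofList _))
    ((PySem.Set.nodup_union _ _ (PySem.Set.nodup_ofList _)).filter _)]
  intro x
  simp only [List.mem_filter, PySem.Set.mem_diff, PySem.Set.mem_union, PySem.Set.mem_ofList,
    Bool.and_eq_true, Bool.not_eq_true', Bool.eq_false_iff, ne_eq,
    PySem.Dict.contains_iff_mem_keys]
  tauto

-- sorted(added_keys) is the tts-only slice of sorted(all_titles)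
theorem pv_sorted_added (tp ttp : PySem.Dict String String) :
    (PySem.List.sorted
        (PySem.Set.union (PySem.Set.ofList tp.keys) (PySem.Set.ofList ttp.keys)) (fun x => x)).filter
        (fun t => !tp.contains t) =
      PySem.List.sorted
        (PySem.Set.diff (PySem.Set.ofList ttp.keys) (PySem.Set.ofList tp.keys)) (fun x => x) := by
  apply pv_sorted_filter _ (PySem.Set.nodup_union _ _ (PySem.Set.nodup_ofList _))
  rw [List.perm_ext_iff_of_nodup
    (PySem.Set.nodup_diff _ _ (PySem.Set.nodup_ofList _))
    ((PySem.Set.nodup_union _ _ (PySem.Set.nodup_ofList _)).filter _)]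
  intro x
  simp only [List.mem_filter, PySem.Set.mem_diff, PySem.Set.mem_union, PySem.Set.mem_ofList,
    Bool.not_eq_true', Bool.eq_false_iff, ne_eq, PySem.Dict.contains_iff_mem_keys]
  tauto

-- ===== VERDICT (by name: the statement is the Claim_ definition above) =====
theorem compare_prioritization_py_spec : Claim_equal_compare_prioritization_py := by
  intro text_eo tts_eo _
  unfold Spec_compare_prioritization_py
  simp only [compare_prioritization_py, compare_prioritization_py_alt, pvALoop_eq_filters]
  rw [← pv_sorted_inter, ← pv_sorted_diff, ← pv_sorted_added, List.filter_filter,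
    List.filter_filter]
  refine congrArg₂ _ (congrArg _ ?_) (congrArg₂ _ (congrArg _ ?_) rfl)
  · exact congrArg _ (List.filter_congr (fun x _ => by ac_rfl))
  · exact congrArg _ (List.filter_congr (fun x _ => by ac_rfl))
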